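-- pv_equiv track=rewrite | github.com/MauriceCalvert/andante | engine/slice_solver.py | check_voice_crossing
-- ===== SOURCE A (Python) =====
-- def check_voice_crossing(
--     candidate: int,
--     voice_index: int,
--     other_pitches: dict[int, int],
--     voice_count: int,
-- ) -> bool:
--     """Check if candidate crosses another voice.
--
--     Per L004: Voice crossing allowed — Bach crosses freely in counterpoint.
--     Only prevents inner voice going above soprano or below bass.
--     Spacing preferences are handled in voice_leading_cost, not here.
--     """
--     for other_idx, other_pitch in other_pitches.items():
--         if other_idx < voice_index and candidate > other_pitch:
--             return True
--         if other_idx > voice_index and candidate < other_pitch: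
--             return True
--     return False
-- ===== SOURCE B (Python) =====
-- def check_voice_crossing(
--     candidate: int,
--     voice_index: int,
--     other_pitches: dict[int, int],
--     voice_count: int,
-- ) -> bool:
--     """Check if candidate crosses another voice (min/max decomposition)."""
--     higher = [p for i, p in other_pitches.items() if i < voice_index]
--     lower = [p for i, p in other_pitches.items() if i > voice_index]
--     return (bool(higher) and candidate > min(higher)) or (
--         bool(lower) and candidate < max(lower)
--     )
-- ===== Notes on version B (the rewrite author's own statement) =====
-- stated objective: alternative
-- what changed: Replaces the early-return scan over dict items by a split into higher/lower voice groups reduced to min/max and two threshold comparisons.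
import Mathlib
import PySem

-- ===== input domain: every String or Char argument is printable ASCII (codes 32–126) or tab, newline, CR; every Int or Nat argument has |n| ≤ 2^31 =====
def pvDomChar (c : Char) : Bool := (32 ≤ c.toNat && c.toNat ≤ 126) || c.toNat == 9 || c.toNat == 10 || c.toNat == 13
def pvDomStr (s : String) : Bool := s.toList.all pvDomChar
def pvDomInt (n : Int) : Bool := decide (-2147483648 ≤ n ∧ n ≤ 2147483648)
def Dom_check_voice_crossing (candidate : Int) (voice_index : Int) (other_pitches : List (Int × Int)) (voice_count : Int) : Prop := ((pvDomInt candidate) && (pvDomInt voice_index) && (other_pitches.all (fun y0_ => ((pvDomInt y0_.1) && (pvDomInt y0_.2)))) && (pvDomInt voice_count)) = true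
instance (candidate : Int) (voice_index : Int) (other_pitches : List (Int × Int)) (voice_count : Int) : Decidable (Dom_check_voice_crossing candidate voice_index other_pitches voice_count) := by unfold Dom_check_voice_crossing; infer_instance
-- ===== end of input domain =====

-- B replaces A's early-return scan by a min/max reduction over the higher/lower voice groups (alternative decomposition, same O(n) cost).


-- ===== PORT A =====
-- literal port of A: scan the items, early return on the first crossing
def check_voice_crossing (candidate : Int) (voice_index : Int) (other_pitches : List (Int × Int)) (voice_count : Int) : Bool :=
  match other_pitches with
  | [] => false
  | (other_idx, other_pitch) :: rest =>
    if other_idx < voice_index ∧ candidate > other_pitch then true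
    else if voice_index < other_idx ∧ candidate < other_pitch then true
    else check_voice_crossing candidate voice_index rest voice_count

-- ===== PORT B =====
-- port of B: split into higher/lower groups, compare candidate against min/max
def check_voice_crossing_alt (candidate : Int) (voice_index : Int) (other_pitches : List (Int × Int)) (voice_count : Int) : Bool :=
  (match PySem.List.min? ((other_pitches.filter (fun pr => pr.1 < voice_index)).map Prod.snd) (fun y => y) with
   | some m => decide (candidate > m)
   | none => false) ||
  (match PySem.List.max? ((other_pitches.filter (fun pr => voice_index < pr.1)).map Prod.snd) (fun y => y) with
   | some m => decide (candidate < m)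
   | none => false)

-- ===== PRECONDITION & SPEC =====
def Spec_check_voice_crossing (candidate : Int) (voice_index : Int) (other_pitches : List (Int × Int)) (voice_count : Int) (out : Bool) : Prop := out = check_voice_crossing_alt candidate voice_index other_pitches voice_count
instance (candidate : Int) (voice_index : Int) (other_pitches : List (Int × Int)) (voice_count : Int) (out : Bool) : Decidable (Spec_check_voice_crossing candidate voice_index other_pitches voice_count out) := by unfold Spec_check_voice_crossing; infer_instance

-- ===== CLAIM (what is proved, stated in full; the proofs are below) =====
def Claim_equal_check_voice_crossing : Prop := ∀ (candidate : Int) (voice_index : Int) (other_pitches : List (Int × Int)) (voice_count : Int), Dom_check_voice_crossing candidate voice_index other_pitches voice_count → Spec_check_voice_crossing candidate voice_index other_pitches voice_count (check_voice_crossing candidate voice_index other_pitches voice_count)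

-- ===== LEMMAS AND PROOFS =====

-- A's early-return scan is an any over the items
lemma portA_eq_any (c v : Int) (ps : List (Int × Int)) (n : Int) :
    check_voice_crossing c v ps n =
      ps.any (fun pr => (decide (pr.1 < v) && decide (c > pr.2)) || (decide (v < pr.1) && decide (c < pr.2))) := by
  induction ps with
  | nil => simp [check_voice_crossing]
  | cons hd tl ih =>
    obtain ⟨i, p⟩ := hd
    simp only [check_voice_crossing, List.any_cons, ih]
    split_ifs with h1 h2
    · simp [h1.1, h1.2]
    · simp [h2.1, h2.2]
    · have e1 : (decide (i < v) && decide (c > p)) = false := by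
        rcases not_and_or.mp h1 with h | h <;> simp [h]
      have e2 : (decide (v < i) && decide (c < p)) = false := by
        rcases not_and_or.mp h2 with h | h <;> simp [h]
      simp [e1, e2]

lemma foldl_min_lt (c : Int) (l : List Int) (p : Int) :
    (decide (c > l.foldl min p)) = (decide (c > p) || l.any (fun x => decide (c > x))) := by
  induction l generalizing p with
  | nil => simp
  | cons x t ih =>
    rw [List.foldl_cons, ih]
    simp only [List.any_cons]
    have h : decide (c > min p x) = (decide (c > p) || decide (c > x)) := by
      simp [gt_iff_lt]
    rw [h, Bool.or_assoc]

lemma foldl_max_gt (c : Int) (l : List Int) (p : Int) :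
    (decide (c < l.foldl max p)) = (decide (c < p) || l.any (fun x => decide (c < x))) := by
  induction l generalizing p with
  | nil => simp
  | cons x t ih =>
    rw [List.foldl_cons, ih]
    simp only [List.any_cons]
    have h : decide (c < max p x) = (decide (c < p) || decide (c < x)) := by
      simp
    rw [h, Bool.or_assoc]

lemma min_branch (c : Int) (l : List Int) :
    (match PySem.List.min? l (fun y => y) with
     | some m => decide (c > m)
     | none => false) = l.any (fun x => decide (c > x)) := by
  cases l with
  | nil => simp [PySem.List.min?]
  | cons p t => rw [PySem.List.min?_id_cons]; simp only [List.any_cons]; exact foldl_min_lt c t p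

lemma max_branch (c : Int) (l : List Int) :
    (match PySem.List.max? l (fun y => y) with
     | some m => decide (c < m)
     | none => false) = l.any (fun x => decide (c < x)) := by
  cases l with
  | nil => simp [PySem.List.max?]
  | cons p t => rw [PySem.List.max?_id_cons]; simp only [List.any_cons]; exact foldl_max_gt c t p

lemma portB_eq_any (c v : Int) (ps : List (Int × Int)) (n : Int) :
    check_voice_crossing_alt c v ps n =
      ps.any (fun pr => (decide (pr.1 < v) && decide (c > pr.2)) || (decide (v < pr.1) && decide (c < pr.2))) := by
  unfold check_voice_crossing_alt
  rw [min_branch, max_branch]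
  simp only [List.any_eq]
  rw [← Bool.decide_or, decide_eq_decide]
  simp only [List.mem_map, List.mem_filter, decide_eq_true_eq]
  constructor
  · rintro (⟨x, ⟨pr, ⟨hm, hp⟩, rfl⟩, hc⟩ | ⟨x, ⟨pr, ⟨hm, hp⟩, rfl⟩, hc⟩)
    · exact ⟨pr, hm, by simp [hp, hc]⟩
    · exact ⟨pr, hm, by simp [hp, hc]⟩
  · rintro ⟨pr, hm, hcond⟩
    simp only [Bool.or_eq_true, Bool.and_eq_true, decide_eq_true_eq] at hcond
    rcases hcond with ⟨h1, h2⟩ | ⟨h1, h2⟩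
    · exact Or.inl ⟨pr.2, ⟨pr, ⟨hm, by simp [h1]⟩, rfl⟩, h2⟩
    · exact Or.inr ⟨pr.2, ⟨pr, ⟨hm, by simp [h1]⟩, rfl⟩, h2⟩

-- ===== VERDICT (by name: the statement is the Claim_ definition above) =====
theorem check_voice_crossing_spec : Claim_equal_check_voice_crossing := by
  intro c v ps n _
  unfold Spec_check_voice_crossing
  rw [portA_eq_any, portB_eq_any]
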